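-- pv_equiv track=rewrite | github.com/albertezem/bagels | optimalValueFunc.py | initializePossibleAnswers
-- ===== SOURCE A (Python) =====
-- def initializePossibleAnswers(n=10):
--     possible = set()
--
--     for i in range(0, n):
--         for j in range(0, n):
--             for k in range(0, n):
--                 if i != j and j != k and i != k:
--                     possible.add(str(i) + str(j) + str(k))
--
--     return possible
-- ===== SOURCE B (Python) =====
-- def initializePossibleAnswers(n=10):
--     # staged breadth-first expansion of partial permutations (prefix string, used digits);
--     # the last stage pours the completed strings straight into the result set
--     partial = [("", ())]
--     for _ in range(2):
--         partial = [(s + str(d), used + (d,))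
--                    for s, used in partial
--                    for d in range(n)
--                    if d not in used]
--     return {s + str(d) for s, used in partial for d in range(n) if d not in used}
-- ===== Notes on version B (the rewrite author's own statement) =====
-- stated objective: alternative
-- what changed: Replaces the triple nested loop with pairwise-distinctness guard by a staged breadth-first expansion: a frontier of partial permutations (prefix string, used digits) is extended digit-by-digit in two passes, and a final pass pours the completed strings into the result set; distinctness is enforced by membership in the used tuple.
import Mathlib
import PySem

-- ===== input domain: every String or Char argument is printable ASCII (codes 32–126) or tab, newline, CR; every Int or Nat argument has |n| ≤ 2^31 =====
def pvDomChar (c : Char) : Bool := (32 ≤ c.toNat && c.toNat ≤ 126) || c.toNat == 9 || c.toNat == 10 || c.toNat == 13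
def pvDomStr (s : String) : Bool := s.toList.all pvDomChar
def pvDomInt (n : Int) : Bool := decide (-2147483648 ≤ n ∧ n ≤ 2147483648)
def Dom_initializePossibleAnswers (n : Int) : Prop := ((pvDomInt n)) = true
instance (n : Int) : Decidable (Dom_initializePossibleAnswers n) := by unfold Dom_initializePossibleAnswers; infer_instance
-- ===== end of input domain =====

-- B replaces A's triple nested loop with its pairwise-distinctness guard by a staged
-- breadth-first expansion of partial permutations (prefix string, used digits); objective: alternative.

-- ===== PORT A =====
def initializePossibleAnswers (n : Int) : List String :=
  (PySem.List.pyRange 0 n 1).foldl (fun possible i =>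
    (PySem.List.pyRange 0 n 1).foldl (fun possible j =>
      (PySem.List.pyRange 0 n 1).foldl (fun possible k =>
        if (i != j) && (j != k) && (i != k) then
          PySem.Set.add possible (PySem.Int.toStr i ++ PySem.Int.toStr j ++ PySem.Int.toStr k)
        else possible) possible) possible) PySem.Set.empty

-- ===== PORT B =====
-- one pass of the 'for _ in range(3)' loop: extend every partial permutation by one unused digit
def pvStep (n : Int) (ps : List (String × List Int)) : List (String × List Int) :=
  ps.flatMap (fun p =>
    ((PySem.List.pyRange 0 n 1).filter (fun d => !(p.2.contains d))).map
      (fun d => (p.1 ++ PySem.Int.toStr d, p.2 ++ [d])))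

def initializePossibleAnswers_alt (n : Int) : List String :=
  PySem.Set.ofList
    (((PySem.List.pyRange 0 2 1).foldl (fun ps _ => pvStep n ps) [("", [])]).flatMap
      (fun p => ((PySem.List.pyRange 0 n 1).filter (fun d => !(p.2.contains d))).map
        (fun d => p.1 ++ PySem.Int.toStr d)))

-- ===== PRECONDITION & SPEC =====
def Spec_initializePossibleAnswers (n : Int) (out : List String) : Prop := out = initializePossibleAnswers_alt n
instance (n : Int) (out : List String) : Decidable (Spec_initializePossibleAnswers n out) := by unfold Spec_initializePossibleAnswers; infer_instance

-- ===== CLAIM (what is proved, stated in full; the proofs are below) =====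
def Claim_equal_initializePossibleAnswers : Prop := ∀ (n : Int), Dom_initializePossibleAnswers n → Spec_initializePossibleAnswers n (initializePossibleAnswers n)

-- ===== LEMMAS AND PROOFS =====

theorem pv_foldl_add_filter_map (p : Int → Bool) (f : Int → String)
    (l : List Int) (s : PySem.Set String) :
    l.foldl (fun s k => if p k then PySem.Set.add s (f k) else s) s
      = PySem.Set.update s ((l.filter p).map f) := by
  rw [PySem.List.foldl_if_eq_foldl_filter p (fun s k => PySem.Set.add s (f k)) l s,
    PySem.Set.update_map_eq_foldl_add]

theorem pv_foldl_update (g : Int → List String) (l : List Int) (s : PySem.Set String) :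
    l.foldl (fun s x => PySem.Set.update s (g x)) s = PySem.Set.update s (l.flatMap g) := by
  induction l generalizing s with
  | nil => simp [PySem.Set.update]
  | cons x t ih =>
    rw [List.flatMap_cons, List.foldl_cons, ih]
    simp [PySem.Set.update, List.foldl_append]

theorem pv_flatMap_filter (p : Int → Bool) (G : Int → List String) (l : List Int) :
    (l.filter p).flatMap G = l.flatMap (fun x => if p x then G x else []) := by
  induction l with
  | nil => rfl
  | cons x t ih =>
    by_cases hp : p x = true
    · simp [List.flatMap_cons, hp, ih]
    · simp [List.flatMap_cons, hp, ih]

-- A as a set-of-list of the i-major, j-, k-minor enumeration with the pairwise guard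
theorem pv_A_eq (n : Int) :
    initializePossibleAnswers n
      = PySem.Set.ofList ((PySem.List.pyRange 0 n 1).flatMap (fun i =>
          (PySem.List.pyRange 0 n 1).flatMap (fun j =>
            ((PySem.List.pyRange 0 n 1).filter (fun k => (i != j) && (j != k) && (i != k))).map
              (fun k => PySem.Int.toStr i ++ PySem.Int.toStr j ++ PySem.Int.toStr k)))) := by
  unfold initializePossibleAnswers
  simp only [pv_foldl_add_filter_map, pv_foldl_update]
  rfl

theorem pv_range2 : PySem.List.pyRange 0 2 1 = [0, 1] := by decide

-- B's frontier after the three passes, unrolled to the same i-major enumeration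
theorem pv_B_list (n : Int) :
    (((PySem.List.pyRange 0 2 1).foldl (fun ps _ => pvStep n ps) [("", [])]).flatMap
      (fun p => ((PySem.List.pyRange 0 n 1).filter (fun d => !(p.2.contains d))).map
        (fun d => p.1 ++ PySem.Int.toStr d)))
      = (PySem.List.pyRange 0 n 1).flatMap (fun i =>
          ((PySem.List.pyRange 0 n 1).filter (fun j => !decide (j = i))).flatMap (fun j =>
            ((PySem.List.pyRange 0 n 1).filter (fun k => !decide (k = i) && !decide (k = j))).map
              (fun k => PySem.Int.toStr i ++ PySem.Int.toStr j ++ PySem.Int.toStr k))) := by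
  rw [pv_range2]
  show ((pvStep n (pvStep n [("", [])])).flatMap _) = _
  simp only [pvStep, List.flatMap_cons, List.flatMap_nil, List.append_nil,
    List.flatMap_map, List.contains_nil,
    Bool.not_false, List.filter_true, List.flatMap_assoc]
  refine List.flatMap_congr (fun i _ => ?_)
  simp [String.append_assoc]

-- the filtered staged enumeration equals A's guarded one
theorem pv_lists_eq (n : Int) :
    (PySem.List.pyRange 0 n 1).flatMap (fun i => (PySem.List.pyRange 0 n 1).flatMap (fun j =>
        ((PySem.List.pyRange 0 n 1).filter (fun k => (i != j) && (j != k) && (i != k))).map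
          (fun k => PySem.Int.toStr i ++ PySem.Int.toStr j ++ PySem.Int.toStr k)))
      = (PySem.List.pyRange 0 n 1).flatMap (fun i =>
          ((PySem.List.pyRange 0 n 1).filter (fun j => !decide (j = i))).flatMap (fun j =>
            ((PySem.List.pyRange 0 n 1).filter (fun k => !decide (k = i) && !decide (k = j))).map
              (fun k => PySem.Int.toStr i ++ PySem.Int.toStr j ++ PySem.Int.toStr k))) := by
  refine List.flatMap_congr (fun i _ => ?_)
  rw [pv_flatMap_filter]
  refine List.flatMap_congr (fun j _ => ?_)
  by_cases hij : j = i
  · subst hij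
    simp
  · rw [if_pos (by simp [hij])]
    refine congrArg (List.map _) (List.filter_congr (fun k _ => ?_))
    by_cases hki : k = i <;> by_cases hkj : k = j <;>
      simp [hki, hkj, bne, hij, Ne.symm hij] <;> omega

-- ===== VERDICT (by name: the statement is the Claim_ definition above) =====
theorem initializePossibleAnswers_spec : Claim_equal_initializePossibleAnswers := by
  intro n _
  show _ = _
  rw [initializePossibleAnswers_alt, pv_A_eq, pv_lists_eq, pv_B_list]
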